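-- pv_equiv track=rewrite | github.com/Stark-Code/Code_Wars | dancingLinks.py | fillConstraintMatrix
-- ===== SOURCE A (Python) =====
-- def fillConstraintMatrix(constraintMatrix, cover, bL):
--     idxOne = 0
--     numbers = list(range(1, len(cover[0]) + 1))
--     lenNum, lenCover = len(numbers), len(cover)
--     for y in range(lenCover):
--         idxTwo, idxThree = lenNum * y + bL, 2 * bL
--         idxFour = (3 * bL) + (lenNum * 3 * (y // 3))
--         for x in range(lenCover):
--             idxFour += (lenNum * (x // 3))
--             for num in numbers:
--                 constraintMatrix[num, y, x][idxOne] = 1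
--                 constraintMatrix[num, y, x][idxTwo] = 1
--                 constraintMatrix[num, y, x][idxThree] = 1
--                 constraintMatrix[num, y, x][idxFour] = 1
--                 idxTwo += 1
--                 idxThree += 1
--                 idxFour += 1
--             idxOne += 1
--             idxTwo -= lenNum
--             idxFour -= lenNum + (lenNum * (x // 3))
--
--     return constraintMatrix
-- ===== SOURCE B (Python) =====
-- def fillConstraintMatrix(constraintMatrix, cover, bL):
--     n, k = len(cover), len(cover[0])
--     cells = [(num, y, x) for y in range(n) for x in range(n) for num in range(1, k + 1)]
--     for num, y, x in cells:
--         constraintMatrix[num, y, x][y * n + x] = 1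
--     for num, y, x in cells:
--         constraintMatrix[num, y, x][bL + k * y + num - 1] = 1
--     for num, y, x in cells:
--         constraintMatrix[num, y, x][2 * bL + k * x + num - 1] = 1
--     for num, y, x in cells:
--         constraintMatrix[num, y, x][3 * bL + 3 * k * (y // 3) + k * (x // 3) + num - 1] = 1
--     return constraintMatrix
-- ===== Notes on version B (the rewrite author's own statement) =====
-- stated objective: alternative
-- what changed: B replaces A's single interleaved triple loop with four running index counters by four staged sweeps over a precomputed (value, row, column) list, one sweep per constraint family (cell, row, column, box), each writing its column index in closed form.
import Mathlib
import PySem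

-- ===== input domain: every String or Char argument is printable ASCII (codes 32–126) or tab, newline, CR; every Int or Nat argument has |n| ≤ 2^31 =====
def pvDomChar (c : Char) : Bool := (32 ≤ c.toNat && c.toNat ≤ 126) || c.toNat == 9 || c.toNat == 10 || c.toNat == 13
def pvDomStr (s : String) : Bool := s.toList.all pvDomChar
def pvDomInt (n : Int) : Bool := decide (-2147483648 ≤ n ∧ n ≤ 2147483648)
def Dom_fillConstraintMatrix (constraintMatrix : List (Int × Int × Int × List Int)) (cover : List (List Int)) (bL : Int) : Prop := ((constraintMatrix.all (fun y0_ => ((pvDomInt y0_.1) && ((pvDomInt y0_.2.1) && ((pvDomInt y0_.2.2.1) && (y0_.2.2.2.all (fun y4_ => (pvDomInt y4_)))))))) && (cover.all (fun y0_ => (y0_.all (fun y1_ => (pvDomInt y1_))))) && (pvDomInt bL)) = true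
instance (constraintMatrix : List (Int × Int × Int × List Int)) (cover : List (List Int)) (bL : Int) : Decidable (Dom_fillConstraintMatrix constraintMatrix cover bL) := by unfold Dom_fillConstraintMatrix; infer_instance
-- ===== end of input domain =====

-- B replaces A's single interleaved triple loop (four running index counters, four constraint
-- columns written per step) by four staged sweeps over a precomputed (value, row, column) list,
-- one sweep per constraint family, each writing its column index in closed form.  Both Pythons
-- mutate the dict argument in place and return it; the equivalence proved here is about the
-- returned dict (which is also the full in-place effect of both).

-- ===== PORT A =====
-- constraintMatrix[num,y,x][idx] = 1  (dict lookup on the triple key, then list item assignment;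
-- the no-match / out-of-range no-op of pvSet1/pySetD is exact under Pre_, which guarantees the
-- key exists and the index is in range, exactly where the Python does not raise)
def pvSet1 : List (Int × Int × Int × List Int) → Int → Int → Int → Int → List (Int × Int × Int × List Int)
  | [], _, _, _, _ => []
  | (a, b, c, row) :: rest, n, y, x, idx =>
    if a = n ∧ b = y ∧ c = x then (a, b, c, PySem.List.pySetD row idx 1) :: rest
    else (a, b, c, row) :: pvSet1 rest n y x idx

-- body of A's 'for num in numbers' loop; state (matrix, idxTwo, idxThree, idxFour), idxOne = o
def pvStepNum (y x o : Int) (st3 : List (Int × Int × Int × List Int) × Int × Int × Int) (num : Int) :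
    List (Int × Int × Int × List Int) × Int × Int × Int :=
  (pvSet1 (pvSet1 (pvSet1 (pvSet1 st3.1 num y x o) num y x st3.2.1) num y x st3.2.2.1) num y x st3.2.2.2,
   st3.2.1 + 1, st3.2.2.1 + 1, st3.2.2.2 + 1)

-- body of A's 'for x in …' loop; state (matrix, idxOne, idxTwo, idxThree, idxFour)
def pvStepX (numbers : List Int) (lenNum y : Int)
    (st2 : List (Int × Int × Int × List Int) × Int × Int × Int × Int) (x : Int) :
    List (Int × Int × Int × List Int) × Int × Int × Int × Int :=
  let r3 := numbers.foldl (pvStepNum y x st2.2.1)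
    (st2.1, st2.2.2.1, st2.2.2.2.1, st2.2.2.2.2 + lenNum * PySem.Int.floordiv x 3)
  (r3.1, st2.2.1 + 1, r3.2.1 - lenNum, r3.2.2.1, r3.2.2.2 - (lenNum + lenNum * PySem.Int.floordiv x 3))

-- body of A's 'for y in …' loop; state (matrix, idxOne); xs is A's range(lenCover)
def pvStepY (numbers xs : List Int) (lenNum bL : Int)
    (st : List (Int × Int × Int × List Int) × Int) (y : Int) :
    List (Int × Int × Int × List Int) × Int :=
  let r := xs.foldl (pvStepX numbers lenNum y)
    (st.1, st.2, lenNum * y + bL, 2 * bL, 3 * bL + lenNum * 3 * PySem.Int.floordiv y 3)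
  (r.1, r.2.1)

def fillConstraintMatrix (constraintMatrix : List (Int × Int × Int × List Int)) (cover : List (List Int)) (bL : Int) : List (Int × Int × Int × List Int) :=
  let numbers := PySem.List.pyRange 1 (((PySem.List.pyGetD cover 0 []).length : Int) + 1) 1
  let lenNum : Int := numbers.length
  let lenCover : Int := cover.length
  ((PySem.List.pyRange 0 lenCover 1).foldl
    (pvStepY numbers (PySem.List.pyRange 0 lenCover 1) lenNum bL) (constraintMatrix, 0)).1

-- ===== PORT B =====
-- Source B's cells comprehension: [(num, y, x) for y in range(n) for x in range(n) for num in range(1, k+1)]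
def pvCells (n k : Int) : List (Int × Int × Int) :=
  (PySem.List.pyRange 0 n 1).flatMap (fun y =>
    (PySem.List.pyRange 0 n 1).flatMap (fun x =>
      (PySem.List.pyRange 1 (k + 1) 1).map (fun num => (num, y, x))))

-- four staged sweeps, one per constraint family (pvSet1 = the dict-row item assignment, as in A)
def fillConstraintMatrix_alt (constraintMatrix : List (Int × Int × Int × List Int)) (cover : List (List Int)) (bL : Int) : List (Int × Int × Int × List Int) :=
  let n : Int := cover.length
  let k : Int := (PySem.List.pyGetD cover 0 []).length
  let cells := pvCells n k
  let m1 := cells.foldl (fun m t => pvSet1 m t.1 t.2.1 t.2.2 (t.2.1 * n + t.2.2)) constraintMatrix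
  let m2 := cells.foldl (fun m t => pvSet1 m t.1 t.2.1 t.2.2 (bL + k * t.2.1 + t.1 - 1)) m1
  let m3 := cells.foldl (fun m t => pvSet1 m t.1 t.2.1 t.2.2 (2 * bL + k * t.2.2 + t.1 - 1)) m2
  cells.foldl (fun m t => pvSet1 m t.1 t.2.1 t.2.2
    (3 * bL + 3 * k * PySem.Int.floordiv t.2.1 3 + k * PySem.Int.floordiv t.2.2 3 + t.1 - 1)) m3

-- ===== PRECONDITION & SPEC =====
-- Pre_ excludes exactly the inputs where the Python raises: empty cover (IndexError on cover[0]),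
-- a missing key (num, y, x) (KeyError), or one of the four written indices out of range for its row
-- (IndexError).  The Nodup clause only states that the argument really is a dict (a Python dict
-- cannot hold duplicate keys), so it excludes no input the Python function ever receives.
def Pre_fillConstraintMatrix (constraintMatrix : List (Int × Int × Int × List Int)) (cover : List (List Int)) (bL : Int) : Prop :=
  cover ≠ [] ∧
  (constraintMatrix.map (fun p => (p.1, p.2.1, p.2.2.1))).Nodup ∧
  ∀ y ∈ List.range cover.length, ∀ x ∈ List.range cover.length,
    ∀ i ∈ List.range (PySem.List.pyGetD cover 0 []).length,
      ((i : Int) + 1, (y : Int), (x : Int)) ∈ constraintMatrix.map (fun p => (p.1, p.2.1, p.2.2.1)) ∧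
      ∀ p ∈ constraintMatrix, p.1 = (i : Int) + 1 → p.2.1 = (y : Int) → p.2.2.1 = (x : Int) →
        PySem.Raise.InRange p.2.2.2.length ((y : Int) * (cover.length : Int) + (x : Int)) ∧
        PySem.Raise.InRange p.2.2.2.length (((PySem.List.pyGetD cover 0 []).length : Int) * (y : Int) + bL + (i : Int)) ∧
        PySem.Raise.InRange p.2.2.2.length (2 * bL + ((PySem.List.pyGetD cover 0 []).length : Int) * (x : Int) + (i : Int)) ∧
        PySem.Raise.InRange p.2.2.2.length
          (3 * bL + 3 * ((PySem.List.pyGetD cover 0 []).length : Int) * PySem.Int.floordiv (y : Int) 3 +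
            ((PySem.List.pyGetD cover 0 []).length : Int) * PySem.Int.floordiv (x : Int) 3 + (i : Int))

instance (constraintMatrix : List (Int × Int × Int × List Int)) (cover : List (List Int)) (bL : Int) : Decidable (Pre_fillConstraintMatrix constraintMatrix cover bL) := by unfold Pre_fillConstraintMatrix; infer_instance

def pvWitness_fillConstraintMatrix : (List (Int × Int × Int × List Int)) × List (List Int) × Int :=
  ([(1, 0, 0, [0])], ([[0]], 0))

def Spec_fillConstraintMatrix (constraintMatrix : List (Int × Int × Int × List Int)) (cover : List (List Int)) (bL : Int) (out : List (Int × Int × Int × List Int)) : Prop := out = fillConstraintMatrix_alt constraintMatrix cover bL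
instance (constraintMatrix : List (Int × Int × Int × List Int)) (cover : List (List Int)) (bL : Int) (out : List (Int × Int × Int × List Int)) : Decidable (Spec_fillConstraintMatrix constraintMatrix cover bL out) := by unfold Spec_fillConstraintMatrix; infer_instance

-- ===== CLAIM =====
def Claim_equal_fillConstraintMatrix : Prop := ∀ (constraintMatrix : List (Int × Int × Int × List Int)) (cover : List (List Int)) (bL : Int), Dom_fillConstraintMatrix constraintMatrix cover bL → Pre_fillConstraintMatrix constraintMatrix cover bL → Spec_fillConstraintMatrix constraintMatrix cover bL (fillConstraintMatrix constraintMatrix cover bL)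

-- ===== LEMMAS AND PROOFS =====

-- the four single-index assignments at one key (A) collapsed into one combined update
def pvSet4 : List (Int × Int × Int × List Int) → Int → Int → Int → Int → Int → Int → Int → List (Int × Int × Int × List Int)
  | [], _, _, _, _, _, _, _ => []
  | (a, b, c, row) :: rest, n, y, x, i1, i2, i3, i4 =>
    if a = n ∧ b = y ∧ c = x then
      (a, b, c, PySem.List.pySetD (PySem.List.pySetD (PySem.List.pySetD (PySem.List.pySetD row i1 1) i2 1) i3 1) i4 1) :: rest
    else (a, b, c, row) :: pvSet4 rest n y x i1 i2 i3 i4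

theorem pvSet4_eq (m : List (Int × Int × Int × List Int)) (n y x i1 i2 i3 i4 : Int) :
    pvSet4 m n y x i1 i2 i3 i4 =
      pvSet1 (pvSet1 (pvSet1 (pvSet1 m n y x i1) n y x i2) n y x i3) n y x i4 := by
  induction m with
  | nil => rfl
  | cons p rest ih =>
    obtain ⟨a, b, c, row⟩ := p
    by_cases h : a = n ∧ b = y ∧ c = x
    · simp [pvSet4, pvSet1, h]
    · simp [pvSet4, pvSet1, h, ih]

-- A's innermost loop: the counters idxTwo..idxFour advance by one per number
theorem pvInnerA (y x o : Int) (c : Nat) (m : List (Int × Int × Int × List Int)) (t2 t3 t4 : Int) :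
    ((List.range c).map (fun k : Nat => (1 : Int) + k)).foldl (pvStepNum y x o) (m, t2, t3, t4)
    = ((List.range c).foldl
        (fun m (k : Nat) => pvSet4 m ((k : Int) + 1) y x o (t2 + k) (t3 + k) (t4 + k)) m,
       t2 + c, t3 + c, t4 + c) := by
  induction c with
  | zero => simp
  | succ n ih =>
    rw [List.range_succ, List.map_append, List.foldl_append, List.foldl_append, ih]
    simp only [List.map_cons, List.map_nil, List.foldl_cons, List.foldl_nil, pvStepNum]
    rw [pvSet4_eq, show (1 : Int) + (n : Int) = (n : Int) + 1 from by ring]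
    push_cast
    exact Prod.ext rfl (Prod.ext (by ring) (Prod.ext (by ring) (by ring)))

-- A's middle loop: idxOne advances by one per x, idxTwo returns to its base, idxThree advances by
-- lenNum per x, idxFour returns to its per-y base
theorem pvMidA (y o0 bL : Int) (K' : Nat) (c : Nat) (m : List (Int × Int × Int × List Int)) :
    ((List.range c).map (fun k : Nat => (k : Int))).foldl
      (pvStepX ((List.range K').map (fun k : Nat => (1 : Int) + k)) (K' : Int) y)
      (m, o0, (K' : Int) * y + bL, 2 * bL, 3 * bL + (K' : Int) * 3 * PySem.Int.floordiv y 3)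
    = ((List.range c).foldl
        (fun m (xk : Nat) => (List.range K').foldl
          (fun m (ik : Nat) => pvSet4 m ((ik : Int) + 1) y (xk : Int) (o0 + (xk : Int))
            ((K' : Int) * y + bL + (ik : Int)) (2 * bL + (K' : Int) * (xk : Int) + (ik : Int))
            (3 * bL + 3 * (K' : Int) * PySem.Int.floordiv y 3 + (K' : Int) * PySem.Int.floordiv (xk : Int) 3 + (ik : Int))) m) m,
       o0 + (c : Int), (K' : Int) * y + bL, 2 * bL + (K' : Int) * (c : Int), 3 * bL + (K' : Int) * 3 * PySem.Int.floordiv y 3) := by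
  induction c with
  | zero => simp
  | succ n ih =>
    rw [List.range_succ, List.map_append, List.foldl_append, List.foldl_append, ih]
    simp only [List.map_cons, List.map_nil, List.foldl_cons, List.foldl_nil, pvStepX]
    rw [pvInnerA]
    push_cast
    refine Prod.ext ?_ (Prod.ext (by ring) (Prod.ext (by ring) (Prod.ext (by ring) (by ring))))
    simp only
    congr 1
    funext m' ik
    congr 1
    ring_nf

-- A's outer loop: idxOne = y * lenCover at the start of row y
theorem pvOuterA (bL : Int) (K' C' : Nat) (c : Nat) (m : List (Int × Int × Int × List Int)) (o : Int) :
    ((List.range c).map (fun k : Nat => (k : Int))).foldl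
      (pvStepY ((List.range K').map (fun k : Nat => (1 : Int) + k))
        ((List.range C').map (fun k : Nat => (k : Int))) (K' : Int) bL)
      (m, o)
    = ((List.range c).foldl
        (fun m (yk : Nat) => (List.range C').foldl
          (fun m (xk : Nat) => (List.range K').foldl
            (fun m (ik : Nat) => pvSet4 m ((ik : Int) + 1) (yk : Int) (xk : Int) (o + (yk : Int) * (C' : Int) + (xk : Int))
              ((K' : Int) * (yk : Int) + bL + (ik : Int)) (2 * bL + (K' : Int) * (xk : Int) + (ik : Int))
              (3 * bL + 3 * (K' : Int) * PySem.Int.floordiv (yk : Int) 3 + (K' : Int) * PySem.Int.floordiv (xk : Int) 3 + (ik : Int))) m) m) m,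
       o + (c : Int) * (C' : Int)) := by
  induction c with
  | zero => simp
  | succ n ih =>
    rw [List.range_succ, List.map_append, List.foldl_append, List.foldl_append, ih]
    simp only [List.map_cons, List.map_nil, List.foldl_cons, List.foldl_nil, pvStepY]
    rw [pvMidA]
    push_cast
    exact Prod.ext rfl (by simp only; ring)

theorem pvRangeZero (n : Nat) :
    PySem.List.pyRange 0 (n : Int) 1 = (List.range n).map (fun k : Nat => (k : Int)) := by
  rw [PySem.List.pyRange_one]
  simp

theorem pvRangeOne (n : Nat) :
    PySem.List.pyRange 1 ((n : Int) + 1) 1 = (List.range n).map (fun k : Nat => (1 : Int) + k) := by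
  rw [PySem.List.pyRange_one]
  simp

-- ===== fold-over-keys = map-over-items machinery =====

def pvKey (p : Int × Int × Int × List Int) : Int × Int × Int := (p.1, p.2.1, p.2.2.1)

-- first-match update of the row stored at a key (pvSet1/pvSet4 with the row transform abstracted)
def pvApply (f : List Int → List Int) : List (Int × Int × Int × List Int) → Int → Int → Int → List (Int × Int × Int × List Int)
  | [], _, _, _ => []
  | (a, b, c, row) :: rest, n, y, x =>
    if a = n ∧ b = y ∧ c = x then (a, b, c, f row) :: rest
    else (a, b, c, row) :: pvApply f rest n y x

theorem pvSet1_to_apply (m : List (Int × Int × Int × List Int)) (n y x idx : Int) :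
    pvSet1 m n y x idx = pvApply (fun r => PySem.List.pySetD r idx 1) m n y x := by
  induction m with
  | nil => rfl
  | cons q rest ih =>
    obtain ⟨a, b, c, row⟩ := q
    by_cases h : a = n ∧ b = y ∧ c = x <;> simp [pvSet1, pvApply, h, ih]

theorem pvSet4_to_apply (m : List (Int × Int × Int × List Int)) (n y x i1 i2 i3 i4 : Int) :
    pvSet4 m n y x i1 i2 i3 i4 =
      pvApply (fun r => PySem.List.pySetD (PySem.List.pySetD (PySem.List.pySetD (PySem.List.pySetD r i1 1) i2 1) i3 1) i4 1) m n y x := by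
  induction m with
  | nil => rfl
  | cons q rest ih =>
    obtain ⟨a, b, c, row⟩ := q
    by_cases h : a = n ∧ b = y ∧ c = x <;> simp [pvSet4, pvApply, h, ih]

-- with distinct keys, one pvApply is a map touching only the (unique) matching item
theorem pvApply_map (f : List Int → List Int) (m : List (Int × Int × Int × List Int))
    (κ : Int × Int × Int) (hm : (m.map pvKey).Nodup) :
    pvApply f m κ.1 κ.2.1 κ.2.2 =
      m.map (fun p => if pvKey p = κ then (p.1, p.2.1, p.2.2.1, f p.2.2.2) else p) := by
  induction m with
  | nil => rfl
  | cons q rest ih =>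
    simp only [List.map_cons, List.nodup_cons] at hm
    obtain ⟨a, b, c, row⟩ := q
    by_cases h : a = κ.1 ∧ b = κ.2.1 ∧ c = κ.2.2
    · have hk : pvKey ((a, b, c, row) : Int × Int × Int × List Int) = κ := by
        obtain ⟨h1, h2, h3⟩ := h
        simp [pvKey, h1, h2, h3]
      have hrest : rest.map (fun p => if pvKey p = κ then (p.1, p.2.1, p.2.2.1, f p.2.2.2) else p) = rest := by
        refine (List.map_congr_left fun p hp => ?_).trans (List.map_id rest)
        have hne : pvKey p ≠ κ := fun he => hm.1 (hk ▸ he ▸ List.mem_map_of_mem hp)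
        simp [hne]
      simp only [pvApply, if_pos h, List.map_cons, if_pos hk, hrest]
    · have hk : pvKey ((a, b, c, row) : Int × Int × Int × List Int) ≠ κ :=
        fun he => h (by simpa [pvKey, Prod.ext_iff] using he)
      simp only [pvApply, if_neg h, List.map_cons, if_neg hk, ih hm.2]

-- the updates preserve every key
theorem pvKeys_map (T : List (Int × Int × Int)) (F : Int × Int × Int → List Int → List Int)
    (m : List (Int × Int × Int × List Int)) :
    ((m.map (fun p => if pvKey p ∈ T then (p.1, p.2.1, p.2.2.1, F (pvKey p) p.2.2.2) else p)).map pvKey)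
      = m.map pvKey := by
  rw [List.map_map]
  refine List.map_congr_left fun p _ => ?_
  show pvKey (if pvKey p ∈ T then (p.1, p.2.1, p.2.2.1, F (pvKey p) p.2.2.2) else p) = pvKey p
  split <;> rfl

theorem pvKey_step (κ : Int × Int × Int) (f : List Int → List Int) (p : Int × Int × Int × List Int) :
    pvKey (if pvKey p = κ then (p.1, p.2.1, p.2.2.1, f p.2.2.2) else p) = pvKey p := by
  split <;> rfl

-- a fold of per-key updates over a duplicate-free key list is one map over the items
theorem pvFoldApply_map (F : Int × Int × Int → List Int → List Int)
    (T : List (Int × Int × Int)) (hT : T.Nodup)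
    (m : List (Int × Int × Int × List Int)) (hm : (m.map pvKey).Nodup) :
    T.foldl (fun m t => pvApply (F t) m t.1 t.2.1 t.2.2) m =
      m.map (fun p => if pvKey p ∈ T then (p.1, p.2.1, p.2.2.1, F (pvKey p) p.2.2.2) else p) := by
  induction T generalizing m with
  | nil => simp
  | cons t T' ih =>
    obtain ⟨htT', hT'⟩ := List.nodup_cons.mp hT
    rw [List.foldl_cons, pvApply_map (F t) m t hm]
    have hkeys : ((m.map (fun p => if pvKey p = t then (p.1, p.2.1, p.2.2.1, F t p.2.2.2) else p)).map pvKey)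
        = m.map pvKey := by
      rw [List.map_map]
      exact List.map_congr_left fun p _ => pvKey_step t (F t) p
    rw [ih hT' _ (hkeys ▸ hm), List.map_map]
    refine List.map_congr_left fun p _ => ?_
    simp only [Function.comp]
    by_cases h : pvKey p = t
    · have hnin : pvKey p ∉ T' := by rw [h]; exact htT'
      have hnin' : pvKey ((p.1, p.2.1, p.2.2.1, F t p.2.2.2) : Int × Int × Int × List Int) ∉ T' := hnin
      have hin : pvKey p ∈ t :: T' := by rw [h]; exact List.mem_cons_self
      rw [if_pos h, if_neg hnin', if_pos hin, h]
    · rw [if_neg h]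
      by_cases h2 : pvKey p ∈ T'
      · rw [if_pos h2, if_pos (List.mem_cons_of_mem t h2)]
      · rw [if_neg h2, if_neg (by simp [List.mem_cons, h, h2])]

-- two staged sweeps fuse into one map applying both updates
theorem pvMapFuse (T : List (Int × Int × Int)) (F G : Int × Int × Int → List Int → List Int)
    (m : List (Int × Int × Int × List Int)) :
    ((m.map (fun p => if pvKey p ∈ T then (p.1, p.2.1, p.2.2.1, F (pvKey p) p.2.2.2) else p)).map
        (fun p => if pvKey p ∈ T then (p.1, p.2.1, p.2.2.1, G (pvKey p) p.2.2.2) else p))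
      = m.map (fun p => if pvKey p ∈ T then (p.1, p.2.1, p.2.2.1, G (pvKey p) (F (pvKey p) p.2.2.2)) else p) := by
  rw [List.map_map]
  refine List.map_congr_left fun p _ => ?_
  simp only [Function.comp]
  by_cases h : pvKey p ∈ T
  · rw [if_pos h]
    have hk : pvKey ((p.1, p.2.1, p.2.2.1, F (pvKey p) p.2.2.2) : Int × Int × Int × List Int) = pvKey p := rfl
    rw [if_pos (show pvKey ((p.1, p.2.1, p.2.2.1, F (pvKey p) p.2.2.2) : Int × Int × Int × List Int) ∈ T from hk ▸ h),
      if_pos h]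
    rfl
  · rw [if_neg h, if_neg h, if_neg h]

-- foldl over a flatMap is the nested foldl
theorem pvFoldl_flatMap {α β γ : Type} (l : List α) (f : α → List β) (g : γ → β → γ) (i : γ) :
    (l.flatMap f).foldl g i = l.foldl (fun acc x => (f x).foldl g acc) i := by
  induction l generalizing i with
  | nil => rfl
  | cons a l ih => simp [List.flatMap_cons, List.foldl_append, ih]

-- the cells list over ranges of Nat casts
theorem pvCells_eq (C K : Nat) :
    pvCells (C : Int) (K : Int) =
      (List.range C).flatMap (fun (yk : Nat) => (List.range C).flatMap (fun (xk : Nat) =>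
        (List.range K).map (fun (ik : Nat) => (((1 : Int) + ik), (yk : Int), (xk : Int))))) := by
  unfold pvCells
  rw [pvRangeZero C, pvRangeOne K]
  rw [List.flatMap_map]
  congr 1
  funext yk
  rw [List.flatMap_map]
  congr 1
  funext xk
  rw [List.map_map]
  rfl

theorem pvCells_nodup (C K : Nat) : (pvCells (C : Int) (K : Int)).Nodup := by
  rw [pvCells_eq]
  apply List.nodup_flatMap.mpr
  refine ⟨fun yk _ => ?_, ?_⟩
  · apply List.nodup_flatMap.mpr
    refine ⟨fun xk _ => ?_, ?_⟩
    · exact List.nodup_range.map fun a b h => by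
        have := congrArg (fun q : Int × Int × Int => q.1) h
        simpa using this
    · refine List.pairwise_iff_forall_sublist.mpr fun {a b} hsub => ?_
      have hab : a ≠ b := (List.pairwise_iff_forall_sublist.mp List.pairwise_lt_range hsub).ne
      intro z hza hzb
      simp only [List.mem_map] at hza hzb
      obtain ⟨i1, _, e1⟩ := hza
      obtain ⟨i2, _, e2⟩ := hzb
      refine hab ?_
      rw [← e2] at e1
      have := congrArg (fun q : Int × Int × Int => q.2.2) e1
      simpa using this
  · refine List.pairwise_iff_forall_sublist.mpr fun {a b} hsub => ?_
    have hab : a ≠ b := (List.pairwise_iff_forall_sublist.mp List.pairwise_lt_range hsub).ne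
    intro z hza hzb
    simp only [List.mem_flatMap, List.mem_map] at hza hzb
    obtain ⟨x1, _, i1, _, e1⟩ := hza
    obtain ⟨x2, _, i2, _, e2⟩ := hzb
    refine hab ?_
    rw [← e2] at e1
    have := congrArg (fun q : Int × Int × Int => q.2.1) e1
    simpa using this

-- the composite per-key row update both versions perform (cell, row, column, box columns in order)
def pvF4 (C K bL : Int) (t : Int × Int × Int) (row : List Int) : List Int :=
  PySem.List.pySetD (PySem.List.pySetD (PySem.List.pySetD (PySem.List.pySetD row
    (t.2.1 * C + t.2.2) 1)
    (bL + K * t.2.1 + t.1 - 1) 1)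
    (2 * bL + K * t.2.2 + t.1 - 1) 1)
    (3 * bL + 3 * K * PySem.Int.floordiv t.2.1 3 + K * PySem.Int.floordiv t.2.2 3 + t.1 - 1) 1

-- A's collapsed inner body, re-expressed as the composite update at the key (1+ik, yk, xk)
theorem pvStepA_eq (C K bL : Int) (m : List (Int × Int × Int × List Int)) (yk xk ik : Nat) :
    pvSet4 m ((ik : Int) + 1) (yk : Int) (xk : Int) ((yk : Int) * C + (xk : Int))
      (K * (yk : Int) + bL + (ik : Int)) (2 * bL + K * (xk : Int) + (ik : Int))
      (3 * bL + 3 * K * PySem.Int.floordiv (yk : Int) 3 + K * PySem.Int.floordiv (xk : Int) 3 + (ik : Int))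
    = pvApply (pvF4 C K bL (((1 : Int) + ik), (yk : Int), (xk : Int))) m ((1 : Int) + ik) (yk : Int) (xk : Int) := by
  have e0 : ((ik : Int) + 1) = (1 : Int) + ik := by ring
  have e2 : K * (yk : Int) + bL + (ik : Int) = bL + K * (yk : Int) + ((1 : Int) + ik) - 1 := by ring
  have e3 : 2 * bL + K * (xk : Int) + (ik : Int) = 2 * bL + K * (xk : Int) + ((1 : Int) + ik) - 1 := by ring
  have e4 : 3 * bL + 3 * K * PySem.Int.floordiv (yk : Int) 3 + K * PySem.Int.floordiv (xk : Int) 3 + (ik : Int)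
      = 3 * bL + 3 * K * PySem.Int.floordiv (yk : Int) 3 + K * PySem.Int.floordiv (xk : Int) 3 + ((1 : Int) + ik) - 1 := by ring
  rw [e0, e2, e3, e4, pvSet4_to_apply]
  rfl

-- ===== VERDICT =====
theorem fillConstraintMatrix_spec : Claim_equal_fillConstraintMatrix := by
  intro constraintMatrix cover bL _ hpre
  obtain ⟨-, hnodup, -⟩ := hpre
  unfold Spec_fillConstraintMatrix
  simp only [fillConstraintMatrix, fillConstraintMatrix_alt]
  rw [pvRangeZero cover.length, pvRangeOne (PySem.List.pyGetD cover 0 []).length]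
  simp only [List.length_map, List.length_range]
  rw [pvOuterA]
  simp only [zero_add]
  have hnd : (constraintMatrix.map pvKey).Nodup := hnodup
  have hT : (pvCells (cover.length : Int) ((PySem.List.pyGetD cover 0 []).length : Int)).Nodup :=
    pvCells_nodup cover.length (PySem.List.pyGetD cover 0 []).length
  -- A's interleaved loop = the fold of the composite update over the cells list
  have hA : (List.range cover.length).foldl
      (fun m (yk : Nat) => (List.range cover.length).foldl
        (fun m (xk : Nat) => (List.range (PySem.List.pyGetD cover 0 []).length).foldl
          (fun m (ik : Nat) => pvSet4 m ((ik : Int) + 1) (yk : Int) (xk : Int) ((yk : Int) * (cover.length : Int) + (xk : Int))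
            (((PySem.List.pyGetD cover 0 []).length : Int) * (yk : Int) + bL + (ik : Int))
            (2 * bL + ((PySem.List.pyGetD cover 0 []).length : Int) * (xk : Int) + (ik : Int))
            (3 * bL + 3 * ((PySem.List.pyGetD cover 0 []).length : Int) * PySem.Int.floordiv (yk : Int) 3 +
              ((PySem.List.pyGetD cover 0 []).length : Int) * PySem.Int.floordiv (xk : Int) 3 + (ik : Int))) m) m)
      constraintMatrix
      = (pvCells (cover.length : Int) ((PySem.List.pyGetD cover 0 []).length : Int)).foldl
          (fun m t => pvApply (pvF4 (cover.length : Int) ((PySem.List.pyGetD cover 0 []).length : Int) bL t) m t.1 t.2.1 t.2.2)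
          constraintMatrix := by
    rw [pvCells_eq, pvFoldl_flatMap]
    refine List.foldl_ext _ _ _ fun acc yk _ => ?_
    rw [pvFoldl_flatMap]
    refine List.foldl_ext _ _ _ fun acc2 xk _ => ?_
    rw [List.foldl_map]
    refine List.foldl_ext _ _ _ fun acc3 ik _ => ?_
    exact pvStepA_eq _ _ _ _ _ _ _
  rw [hA]
  rw [pvFoldApply_map (pvF4 (cover.length : Int) ((PySem.List.pyGetD cover 0 []).length : Int) bL) _ hT _ hnd]
  -- B: each staged sweep is a map; fuse the four maps
  simp only [pvSet1_to_apply]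
  rw [pvFoldApply_map (fun t r => PySem.List.pySetD r (t.2.1 * (cover.length : Int) + t.2.2) 1) _ hT _ hnd]
  rw [pvFoldApply_map (fun t r => PySem.List.pySetD r (bL + ((PySem.List.pyGetD cover 0 []).length : Int) * t.2.1 + t.1 - 1) 1) _ hT _ (by rw [pvKeys_map _ (fun t r => PySem.List.pySetD r (t.2.1 * (cover.length : Int) + t.2.2) 1)]; exact hnd)]
  rw [pvMapFuse _ (fun t r => PySem.List.pySetD r (t.2.1 * (cover.length : Int) + t.2.2) 1) (fun t r => PySem.List.pySetD r (bL + ((PySem.List.pyGetD cover 0 []).length : Int) * t.2.1 + t.1 - 1) 1)]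
  rw [pvFoldApply_map (fun t r => PySem.List.pySetD r (2 * bL + ((PySem.List.pyGetD cover 0 []).length : Int) * t.2.2 + t.1 - 1) 1) _ hT _ (by rw [pvKeys_map _ (fun t r => (fun t r => PySem.List.pySetD r (bL + ((PySem.List.pyGetD cover 0 []).length : Int) * t.2.1 + t.1 - 1) 1) t ((fun t r => PySem.List.pySetD r (t.2.1 * (cover.length : Int) + t.2.2) 1) t r))]; exact hnd)]
  rw [pvMapFuse _ (fun t r => (fun t r => PySem.List.pySetD r (bL + ((PySem.List.pyGetD cover 0 []).length : Int) * t.2.1 + t.1 - 1) 1) t ((fun t r => PySem.List.pySetD r (t.2.1 * (cover.length : Int) + t.2.2) 1) t r)) (fun t r => PySem.List.pySetD r (2 * bL + ((PySem.List.pyGetD cover 0 []).length : Int) * t.2.2 + t.1 - 1) 1)]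
  rw [pvFoldApply_map (fun t r => PySem.List.pySetD r (3 * bL + 3 * ((PySem.List.pyGetD cover 0 []).length : Int) * PySem.Int.floordiv t.2.1 3 + ((PySem.List.pyGetD cover 0 []).length : Int) * PySem.Int.floordiv t.2.2 3 + t.1 - 1) 1) _ hT _ (by rw [pvKeys_map _ (fun t r => (fun t r => PySem.List.pySetD r (2 * bL + ((PySem.List.pyGetD cover 0 []).length : Int) * t.2.2 + t.1 - 1) 1) t ((fun t r => (fun t r => PySem.List.pySetD r (bL + ((PySem.List.pyGetD cover 0 []).length : Int) * t.2.1 + t.1 - 1) 1) t ((fun t r => PySem.List.pySetD r (t.2.1 * (cover.length : Int) + t.2.2) 1) t r)) t r))]; exact hnd)]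
  rw [pvMapFuse _ (fun t r => (fun t r => PySem.List.pySetD r (2 * bL + ((PySem.List.pyGetD cover 0 []).length : Int) * t.2.2 + t.1 - 1) 1) t ((fun t r => (fun t r => PySem.List.pySetD r (bL + ((PySem.List.pyGetD cover 0 []).length : Int) * t.2.1 + t.1 - 1) 1) t ((fun t r => PySem.List.pySetD r (t.2.1 * (cover.length : Int) + t.2.2) 1) t r)) t r)) (fun t r => PySem.List.pySetD r (3 * bL + 3 * ((PySem.List.pyGetD cover 0 []).length : Int) * PySem.Int.floordiv t.2.1 3 + ((PySem.List.pyGetD cover 0 []).length : Int) * PySem.Int.floordiv t.2.2 3 + t.1 - 1) 1)]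
  rfl
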